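-- pv_equiv track=rewrite | github.com/ShipBit/wingman-ai | services/config_manager.py | __merge_command_lists
-- ===== SOURCE A (Python) =====
-- def __merge_command_lists(default_commands, wingman_commands):
--     """Merge two lists of commands, where wingman-specific commands override or get added based on the 'name' key."""
--
--     if wingman_commands is None:
--         return default_commands
--
--     # Use a dictionary to ensure unique names and allow easy overrides
--     merged_commands = {cmd["name"]: cmd for cmd in default_commands}
--     for cmd in wingman_commands:
--         merged_commands[cmd["name"]] = (
--             cmd  # Will override or add the wingman-specific command
--         )
--     # Convert merged commands back to a list since that's the expected format
--     return list(merged_commands.values())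
-- ===== SOURCE B (Python) =====
-- def __merge_command_lists(default_commands, wingman_commands):
--     """Merge two lists of commands, where wingman-specific commands override or get added based on the 'name' key."""
--
--     if wingman_commands is None:
--         return default_commands
--
--     all_cmds = default_commands + wingman_commands
--     # Stage 1: the merged order is the first-occurrence order of names.
--     order = []
--     for cmd in all_cmds:
--         if cmd["name"] not in order:
--             order.append(cmd["name"])
--     # Stage 2: for each name, the winning command is its LAST occurrence overall.
--     return [next(c for c in reversed(all_cmds) if c["name"] == n) for n in order]
-- ===== Notes on version B (the rewrite author's own statement) =====
-- stated objective: alternative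
-- what changed: Replaces A's incremental ordered-dict accumulation (insert/override one command at a time, then list(values())) by a non-incremental characterisation in two staged passes: first collect the first-occurrence order of names, then for each name select its last occurrence by scanning the concatenated list backwards; no dict and no overwrite step exist in B.
import Mathlib
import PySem

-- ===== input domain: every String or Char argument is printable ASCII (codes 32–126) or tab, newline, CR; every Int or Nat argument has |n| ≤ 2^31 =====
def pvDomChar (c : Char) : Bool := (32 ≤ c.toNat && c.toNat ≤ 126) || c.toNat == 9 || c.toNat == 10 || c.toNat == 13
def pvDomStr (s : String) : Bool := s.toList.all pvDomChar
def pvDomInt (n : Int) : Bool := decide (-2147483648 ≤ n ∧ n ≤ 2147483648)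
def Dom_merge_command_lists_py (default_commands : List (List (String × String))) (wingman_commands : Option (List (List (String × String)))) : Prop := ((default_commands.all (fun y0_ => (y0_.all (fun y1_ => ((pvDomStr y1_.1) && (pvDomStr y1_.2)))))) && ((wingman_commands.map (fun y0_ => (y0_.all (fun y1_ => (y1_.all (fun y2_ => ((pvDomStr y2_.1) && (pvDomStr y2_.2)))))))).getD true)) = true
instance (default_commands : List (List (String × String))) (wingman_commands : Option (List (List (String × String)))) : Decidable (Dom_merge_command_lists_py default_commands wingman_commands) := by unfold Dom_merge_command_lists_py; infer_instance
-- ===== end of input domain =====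

-- B replaces A's incremental ordered-dict accumulation by a non-incremental two-stage
-- characterisation: first-occurrence order of names, then for each name its last
-- occurrence found by a backward scan (alternative decomposition, quadratic but dict-free).

-- ===== PORT A =====
-- cmd["name"] (first match in the association list; Python raises KeyError when
-- absent — those inputs are outside Pre_, the default "" is never claimed about)
def pvName (cmd : List (String × String)) : String := (List.lookup "name" cmd).getD ""

def merge_command_lists_py (default_commands : List (List (String × String))) (wingman_commands : Option (List (List (String × String)))) : List (List (String × String)) :=
  match wingman_commands with
  | none => default_commands
  | some wl =>
    -- merged_commands = {cmd["name"]: cmd for cmd in default_commands}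
    let merged := default_commands.foldl
      (fun m cmd => m.insert (pvName cmd) cmd)
      (PySem.Dict.empty : PySem.Dict String (List (String × String)))
    -- for cmd in wingman_commands: merged_commands[cmd["name"]] = cmd
    let merged := wl.foldl (fun m cmd => m.insert (pvName cmd) cmd) merged
    merged.values

-- ===== PORT B =====
def merge_command_lists_py_alt (default_commands : List (List (String × String))) (wingman_commands : Option (List (List (String × String)))) : List (List (String × String)) :=
  match wingman_commands with
  | none => default_commands
  | some wl =>
    let all_cmds := default_commands ++ wl
    -- stage 1: order = the first-occurrence order of names (membership test + append)
    let order := all_cmds.foldl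
      (fun acc cmd => if pvName cmd ∈ acc then acc else acc ++ [pvName cmd]) []
    -- stage 2: for each name, its last occurrence via a backward scan; the .getD []
    -- default is unreachable (every name in `order` is the name of some command)
    order.map (fun n => ((all_cmds.reverse.find? (fun c => pvName c == n)).getD []))

-- ===== PRECONDITION & SPEC =====
-- When wingman_commands is not None, A looks up cmd["name"] on every command and
-- raises KeyError when it is missing: Pre_ excludes those inputs (B raises there too).
-- It also requires each command's association list to carry distinct keys, since a
-- list with duplicate keys does not represent a Python dict (Python dedups it at
-- construction, keeping the last value, while the ports look up the first match);
-- when wingman_commands is None, A touches nothing and no restriction is needed.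
def Pre_merge_command_lists_py (default_commands : List (List (String × String))) (wingman_commands : Option (List (List (String × String)))) : Prop :=
  wingman_commands ≠ none →
    ((∀ cmd ∈ default_commands, (cmd.map Prod.fst).Nodup ∧ "name" ∈ cmd.map Prod.fst) ∧
     (∀ cmd ∈ wingman_commands.getD [], (cmd.map Prod.fst).Nodup ∧ "name" ∈ cmd.map Prod.fst))
instance (default_commands : List (List (String × String))) (wingman_commands : Option (List (List (String × String)))) : Decidable (Pre_merge_command_lists_py default_commands wingman_commands) := by unfold Pre_merge_command_lists_py; infer_instance

def pvWitness_merge_command_lists_py : (List (List (String × String))) × (Option (List (List (String × String)))) :=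
  ([[("name", "a"), ("key", "x")]], some [[("name", "b")], [("name", "a"), ("key", "y")]])

def Spec_merge_command_lists_py (default_commands : List (List (String × String))) (wingman_commands : Option (List (List (String × String)))) (out : List (List (String × String))) : Prop := out = merge_command_lists_py_alt default_commands wingman_commands
instance (default_commands : List (List (String × String))) (wingman_commands : Option (List (List (String × String)))) (out : List (List (String × String))) : Decidable (Spec_merge_command_lists_py default_commands wingman_commands out) := by unfold Spec_merge_command_lists_py; infer_instance

-- ===== CLAIM (what is proved, stated in full; the proofs are below) =====
def Claim_equal_merge_command_lists_py : Prop := ∀ (default_commands : List (List (String × String))) (wingman_commands : Option (List (List (String × String)))), Dom_merge_command_lists_py default_commands wingman_commands → Pre_merge_command_lists_py default_commands wingman_commands → Spec_merge_command_lists_py default_commands wingman_commands (merge_command_lists_py default_commands wingman_commands)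

-- ===== LEMMAS AND PROOFS =====

-- A's get? after the insert fold = the last command with that name (backward find?)
theorem pv_get?_fold (l : List (List (String × String)))
    (m : PySem.Dict String (List (String × String))) (k : String) :
    (l.foldl (fun m cmd => m.insert (pvName cmd) cmd) m).get? k
      = (l.reverse.find? (fun c => pvName c == k)).or (m.get? k) := by
  induction l generalizing m with
  | nil => simp
  | cons c t ih =>
    simp only [List.foldl_cons, List.reverse_cons, List.find?_append, ih]
    rw [PySem.Dict.get?_insert]
    by_cases h : pvName c = k
    · simp [List.find?, h]
    · have hb : (pvName c == k) = false := by simp [h]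
      rw [if_neg (fun h' : k = pvName c => h h'.symm)]
      simp [List.find?, hb]

-- ===== VERDICT (by name: the statement is the Claim_ definition above) =====
theorem merge_command_lists_py_spec : Claim_equal_merge_command_lists_py := by
  intro d w _ _
  unfold Spec_merge_command_lists_py merge_command_lists_py merge_command_lists_py_alt
  cases w with
  | none => rfl
  | some wl =>
    simp only
    rw [← List.foldl_append]
    set all := d ++ wl with hall
    set M := all.foldl (fun m cmd => m.insert (pvName cmd) cmd)
      (PySem.Dict.empty : PySem.Dict String (List (String × String))) with hM
    have hnd : M.keys.Nodup := by
      rw [hM]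
      exact PySem.Dict.nodup_keys_foldl_insert_key all pvName (fun _ c => c) _
        PySem.Dict.nodup_keys_empty
    have hkeys : M.keys
        = all.foldl (fun acc cmd => if pvName cmd ∈ acc then acc else acc ++ [pvName cmd]) [] := by
      rw [hM, PySem.Dict.keys_foldl_insert_key]
      rw [PySem.Dict.keys_empty]
      show PySem.Set.update [] (all.map pvName) = _
      have hadd : PySem.Set.add (α := String)
          = fun acc x => if x ∈ acc then acc else acc ++ [x] := by
        funext acc x
        simp [PySem.Set.add, PySem.Set.contains]
      rw [PySem.Set.update, hadd, List.foldl_map]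
    have hvals := PySem.Dict.values_eq_map_keys M hnd []
    rw [hvals, hkeys]
    apply List.map_congr_left
    intro n _
    rw [PySem.Dict.getD_eq_get?_getD, hM, pv_get?_fold all PySem.Dict.empty n]
    simp
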